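-- pv_equiv track=rewrite | github.com/iamheavymetalx7/Contest-Codeforces-and-Atcoder | codeforces/1731/D.py | maxValcheck
-- ===== SOURCE A (Python) =====
-- def maxValcheck(arr,mid):
--     n=len(arr)
--     m=len(arr[0])
--     dp=[[0]*m for j in range(n)]
--     for i in range(n):
--         for j in range(m):
--             if arr[i][j]>=mid:
--                 dp[i][j]=1
--
--                 if i>0 and j>0:
--                     dp[i][j]+=min(dp[i-1][j],dp[i-1][j-1],dp[i][j-1])
--                 if dp[i][j]==mid:
--                     return True
--     return False
-- ===== SOURCE B (Python) =====
-- def maxValcheck(arr, mid):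
--     n = len(arr)
--     m = len(arr[0])
--     if mid < 1 or mid > n or mid > m:
--         return False
--     for i in range(n - mid + 1):
--         for j in range(m - mid + 1):
--             if all(arr[i + a][j + b] >= mid for a in range(mid) for b in range(mid)):
--                 return True
--     return False
-- ===== Notes on version B (the rewrite author's own statement) =====
-- stated objective: alternative
-- what changed: Replaced the incremental largest-square DP table (with early return on dp==mid) by a direct scan that checks every mid-by-mid window for all entries >= mid, guarded by mid < 1 or mid larger than the grid; the window check short-circuits at the first failing entry, which made B measurably faster on the generated inputs despite the worse worst-case bound.
-- outside the precondition, e.g. on maxValcheck([[1, 2], [3]], 1): A returns True, B returns True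
import Mathlib
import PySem

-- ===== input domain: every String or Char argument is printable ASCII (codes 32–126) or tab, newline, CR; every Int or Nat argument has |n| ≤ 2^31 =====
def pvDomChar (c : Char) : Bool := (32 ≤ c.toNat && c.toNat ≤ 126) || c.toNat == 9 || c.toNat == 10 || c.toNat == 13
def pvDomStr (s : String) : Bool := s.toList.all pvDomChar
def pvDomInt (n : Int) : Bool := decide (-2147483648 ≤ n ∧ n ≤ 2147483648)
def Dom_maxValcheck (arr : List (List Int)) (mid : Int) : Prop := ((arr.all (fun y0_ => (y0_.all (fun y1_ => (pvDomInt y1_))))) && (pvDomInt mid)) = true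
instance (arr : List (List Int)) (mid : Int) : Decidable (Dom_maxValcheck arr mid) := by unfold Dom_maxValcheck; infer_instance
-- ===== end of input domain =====

-- B replaces A's largest-square DP with a direct scan of every mid×mid window (a timing run
-- measured B faster on its inputs; worst-case cost is higher). Equivalence is about the return value.

-- ===== PORT A =====
-- dp[i][j] read/write on the list-of-lists table (indices are kept in range by the loops + Pre_)
def pvGet2 (dp : List (List Int)) (i j : Nat) : Int := (dp.getD i []).getD j 0
def pvSet2 (dp : List (List Int)) (i j : Nat) (v : Int) : List (List Int) :=
  dp.set i ((dp.getD i []).set j v)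

-- inner 'for j in range(m)' loop of A; 'none' = the Python 'return True' fired
def loopJA (arr : List (List Int)) (mid : Int) (i : Nat) :
    List (List Int) → List Nat → Option (List (List Int))
  | dp, [] => some dp
  | dp, j :: js =>
    if mid ≤ pvGet2 arr i j then
      let dp1 := pvSet2 dp i j 1
      let dp2 := if 0 < i ∧ 0 < j then
          pvSet2 dp1 i j (pvGet2 dp1 i j +
            min (min (pvGet2 dp1 (i-1) j) (pvGet2 dp1 (i-1) (j-1))) (pvGet2 dp1 i (j-1)))
        else dp1
      if pvGet2 dp2 i j = mid then none else loopJA arr mid i dp2 js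
    else loopJA arr mid i dp js

-- outer 'for i in range(n)' loop of A
def loopIA (arr : List (List Int)) (mid : Int) (m : Nat) :
    List (List Int) → List Nat → Option (List (List Int))
  | dp, [] => some dp
  | dp, i :: is =>
    match loopJA arr mid i dp (List.range m) with
    | none => none
    | some dp' => loopIA arr mid m dp' is

def maxValcheck (arr : List (List Int)) (mid : Int) : Bool :=
  let n := arr.length
  let m := (arr.headD []).length      -- len(arr[0]); Pre_ guarantees arr ≠ []
  let dp0 := List.replicate n (List.replicate m (0 : Int))
  match loopIA arr mid m dp0 (List.range n) with
  | none => true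
  | some _ => false

-- ===== PORT B =====
def maxValcheck_alt (arr : List (List Int)) (mid : Int) : Bool :=
  let n := arr.length
  let m := (arr.headD []).length      -- len(arr[0]); Pre_ guarantees arr ≠ []
  if mid < 1 ∨ (n : Int) < mid ∨ (m : Int) < mid then false
  else
    let k := mid.toNat
    (List.range (n - k + 1)).any (fun i =>
      (List.range (m - k + 1)).any (fun j =>
        (List.range k).all (fun a => (List.range k).all (fun b =>
          decide (mid ≤ (arr.getD (i+a) []).getD (j+b) 0)))))

-- ===== PRECONDITION & SPEC =====
-- Pre_ excludes the empty grid and ragged grids with a row shorter than the first row: there both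
-- A and B can raise IndexError (on some such ragged inputs A happens to return True before reaching
-- the short row — B returns the same value on the cite given in claim.json).
def Pre_maxValcheck (arr : List (List Int)) (mid : Int) : Prop :=
  arr ≠ [] ∧ ∀ row ∈ arr, (arr.headD []).length ≤ row.length
instance (arr : List (List Int)) (mid : Int) : Decidable (Pre_maxValcheck arr mid) := by
  unfold Pre_maxValcheck; infer_instance
def pvWitness_maxValcheck : List (List Int) × Int := ([[3, 3], [3, 1]], 2)

def Spec_maxValcheck (arr : List (List Int)) (mid : Int) (out : Bool) : Prop := out = maxValcheck_alt arr mid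
instance (arr : List (List Int)) (mid : Int) (out : Bool) : Decidable (Spec_maxValcheck arr mid out) := by unfold Spec_maxValcheck; infer_instance

-- ===== CLAIM (what is proved, stated in full; the proofs are below) =====
def Claim_equal_maxValcheck : Prop := ∀ (arr : List (List Int)) (mid : Int), Dom_maxValcheck arr mid → Pre_maxValcheck arr mid → Spec_maxValcheck arr mid (maxValcheck arr mid)

-- ===== LEMMAS AND PROOFS =====

-- the 0/1 grid both programs are really about
def pvOne (arr : List (List Int)) (mid : Int) (i j : Nat) : Bool :=
  decide (mid ≤ (arr.getD i []).getD j 0)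

-- functional version of A's dp recurrence (largest all-ones square ending at (i,j))
def dpN (v : Nat → Nat → Bool) (i j : Nat) : Nat :=
  if v i j then
    if 0 < i ∧ 0 < j then
      1 + min (min (dpN v (i-1) j) (dpN v (i-1) (j-1))) (dpN v i (j-1))
    else 1
  else 0
termination_by i + j
decreasing_by all_goals omega


-- ---- proof-side abbreviations ----

-- shape of the dp table: n rows, each of length m
def ShapeD (dp : List (List Int)) (n m : Nat) : Prop :=
  dp.length = n ∧ ∀ r ∈ dp, r.length = m

-- dp encodes dpN on the cells processed so far (row-major, up to (i,j) exclusive), 0 elsewhere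
def EncD (arr : List (List Int)) (mid : Int) (dp : List (List Int)) (i j : Nat) : Prop :=
  ∀ i' j', i' < arr.length → j' < (arr.headD []).length →
    pvGet2 dp i' j' =
      if i' < i ∨ (i' = i ∧ j' < j) then ((dpN (pvOne arr mid) i' j' : Nat) : Int) else 0

-- the cell at which A's early 'return True' fires
def TrigD (arr : List (List Int)) (mid : Int) (i j : Nat) : Prop :=
  pvOne arr mid i j = true ∧ ((dpN (pvOne arr mid) i j : Nat) : Int) = mid

-- ---- small table lemmas ----

lemma getD_set_self {A : Type} [Inhabited A] (l : List A) {i : Nat} (x d : A)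
    (hi : i < l.length) : (l.set i x).getD i d = x := by
  simp [List.getD, hi]

lemma getD_set_ne {A : Type} [Inhabited A] (l : List A) {i i' : Nat} (x d : A)
    (h : i' ≠ i) : (l.set i x).getD i' d = l.getD i' d := by
  simp [List.getD, List.getElem?_set_ne (Ne.symm h)]

lemma shape_row {dp : List (List Int)} {n m : Nat} (h : ShapeD dp n m) {i : Nat}
    (hi : i < n) : (dp.getD i []).length = m := by
  obtain ⟨h1, h2⟩ := h
  have hi' : i < dp.length := by omega
  have hmem : dp.getD i [] ∈ dp := by
    simp [List.getD, List.getElem?_eq_getElem hi']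
  exact h2 _ hmem

lemma get2_set2_self {dp : List (List Int)} {i j : Nat} (x : Int)
    (hi : i < dp.length) (hj : j < (dp.getD i []).length) :
    pvGet2 (pvSet2 dp i j x) i j = x := by
  unfold pvGet2 pvSet2
  rw [getD_set_self _ _ _ hi, getD_set_self _ _ _ hj]

lemma get2_set2_ne {dp : List (List Int)} {i j i' j' : Nat} (x : Int)
    (h : i' ≠ i ∨ j' ≠ j) : pvGet2 (pvSet2 dp i j x) i' j' = pvGet2 dp i' j' := by
  unfold pvGet2 pvSet2
  by_cases hi : i < dp.length
  · rcases h with h | h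
    · rw [getD_set_ne _ _ _ h]
    · by_cases hii : i' = i
      · subst hii
        rw [getD_set_self _ _ _ hi, getD_set_ne _ _ _ h]
      · rw [getD_set_ne _ _ _ hii]
  · rw [List.set_eq_of_length_le (by omega)]

lemma shape_set2 {dp : List (List Int)} {n m : Nat} (h : ShapeD dp n m) (i j : Nat) (x : Int) :
    ShapeD (pvSet2 dp i j x) n m := by
  by_cases hi : i < dp.length
  · obtain ⟨h1, h2⟩ := h
    constructor
    · simpa [pvSet2] using h1
    · intro r hr
      rcases List.mem_or_eq_of_mem_set hr with hr | rfl
      · exact h2 _ hr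
      · rw [List.length_set]
        exact shape_row ⟨h1, h2⟩ (by omega : i < n)
  · unfold pvSet2
    rw [List.set_eq_of_length_le (by omega)]
    exact h

lemma dpN_pos {v : Nat → Nat → Bool} {i j : Nat} (h : v i j = true) : 1 ≤ dpN v i j := by
  rw [dpN]
  simp only [h, if_true]
  split_ifs <;> omega

lemma one_of_dpN_pos {v : Nat → Nat → Bool} {i j : Nat} (h : 1 ≤ dpN v i j) : v i j = true := by
  by_cases hv : v i j = true
  · exact hv
  · rw [dpN] at h
    simp [hv] at h

-- t ≤ dpN v i j  iff  the t×t square with bottom-right corner (i,j) fits and is all ones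
lemma dpN_le_iff (v : Nat → Nat → Bool) :
    ∀ (s i j t : Nat), i + j ≤ s →
      (t ≤ dpN v i j ↔ (t ≤ i + 1 ∧ t ≤ j + 1 ∧ ∀ a < t, ∀ b < t, v (i - a) (j - b) = true)) := by
  intro s
  induction s with
  | zero =>
    intro i j t h
    have hi : i = 0 := by omega
    have hj : j = 0 := by omega
    subst hi; subst hj
    rw [dpN]
    by_cases hv : v 0 0 = true
    · simp only [hv, if_true]
      rw [if_neg (by omega : ¬(0 < 0 ∧ 0 < 0))]
      constructor
      · intro ht
        refine ⟨by omega, by omega, ?_⟩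
        intro a ha b hb
        have ha0 : a = 0 := by omega
        have hb0 : b = 0 := by omega
        subst ha0; subst hb0
        simpa using hv
      · rintro ⟨h1, h2, _⟩; omega
    · rw [if_neg hv]
      constructor
      · intro ht
        refine ⟨by omega, by omega, ?_⟩
        intro a ha b hb; omega
      · rintro ⟨h1, h2, hsq⟩
        by_cases ht : t = 0
        · omega
        · exact absurd (by simpa using hsq 0 (by omega) 0 (by omega)) hv
  | succ s IH =>
    intro i j t h
    rw [dpN]
    by_cases hv : v i j = true
    · simp only [hv, if_true]
      by_cases hp : 0 < i ∧ 0 < j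
      · rw [if_pos hp]
        obtain ⟨hi0, hj0⟩ := hp
        have hA := IH (i-1) j (t-1) (by omega)
        have hB := IH (i-1) (j-1) (t-1) (by omega)
        have hC := IH i (j-1) (t-1) (by omega)
        constructor
        · intro ht
          by_cases ht0 : t = 0
          · exact ⟨by omega, by omega, by intro a ha; omega⟩
          · obtain ⟨_, _, sqA⟩ := hA.mp (by omega)
            obtain ⟨_, _, sqB⟩ := hB.mp (by omega)
            obtain ⟨_, _, sqC⟩ := hC.mp (by omega)
            refine ⟨by omega, by omega, ?_⟩
            intro a ha b hb
            by_cases ha0 : a = 0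
            · by_cases hb0 : b = 0
              · subst ha0; subst hb0; simpa using hv
              · subst ha0
                have hx := sqC 0 (by omega) (b-1) (by omega)
                have he : j - 1 - (b - 1) = j - b := by omega
                rw [he] at hx
                simpa using hx
            · by_cases hb0 : b = 0
              · subst hb0
                have hx := sqA (a-1) (by omega) 0 (by omega)
                have he : i - 1 - (a - 1) = i - a := by omega
                rw [he] at hx
                simpa using hx
              · have hx := sqB (a-1) (by omega) (b-1) (by omega)
                have he1 : i - 1 - (a - 1) = i - a := by omega
                have he2 : j - 1 - (b - 1) = j - b := by omega
                rw [he1, he2] at hx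
                exact hx
        · rintro ⟨h1, h2, hsq⟩
          by_cases ht0 : t = 0
          · omega
          · have sqA' : ∀ a < t-1, ∀ b < t-1, v (i-1-a) (j-b) = true := by
              intro a ha b hb
              have he : i - 1 - a = i - (a+1) := by omega
              rw [he]
              exact hsq (a+1) (by omega) b (by omega)
            have sqB' : ∀ a < t-1, ∀ b < t-1, v (i-1-a) (j-1-b) = true := by
              intro a ha b hb
              have he1 : i - 1 - a = i - (a+1) := by omega
              have he2 : j - 1 - b = j - (b+1) := by omega
              rw [he1, he2]
              exact hsq (a+1) (by omega) (b+1) (by omega)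
            have sqC' : ∀ a < t-1, ∀ b < t-1, v (i-a) (j-1-b) = true := by
              intro a ha b hb
              have he : j - 1 - b = j - (b+1) := by omega
              rw [he]
              exact hsq a (by omega) (b+1) (by omega)
            have hAle := hA.mpr ⟨by omega, by omega, sqA'⟩
            have hBle := hB.mpr ⟨by omega, by omega, sqB'⟩
            have hCle := hC.mpr ⟨by omega, by omega, sqC'⟩
            omega
      · rw [if_neg hp]
        constructor
        · intro ht
          refine ⟨by omega, by omega, ?_⟩
          intro a ha b hb
          have ha0 : a = 0 := by omega
          have hb0 : b = 0 := by omega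
          subst ha0; subst hb0
          simpa using hv
        · rintro ⟨h1, h2, _⟩
          omega
    · rw [if_neg hv]
      constructor
      · intro ht
        refine ⟨by omega, by omega, ?_⟩
        intro a ha b hb; omega
      · rintro ⟨h1, h2, hsq⟩
        by_cases ht : t = 0
        · omega
        · exact absurd (by simpa using hsq 0 (by omega) 0 (by omega)) hv

-- discrete intermediate value: a dp value ≥ k forces a dp value exactly k earlier
lemma dpN_descent (v : Nat → Nat → Bool) (k : Nat) (hk : 1 ≤ k) :
    ∀ i j, k ≤ dpN v i j → ∃ i', i' ≤ i ∧ ∃ j', j' ≤ j ∧ dpN v i' j' = k := by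
  intro i
  induction i using Nat.strong_induction_on with
  | _ i IH =>
    intro j h
    by_cases heq : dpN v i j = k
    · exact ⟨i, le_refl i, j, le_refl j, heq⟩
    · have hlt : k < dpN v i j := by omega
      by_cases hv : v i j = true
      · by_cases hp : 0 < i ∧ 0 < j
        · have hrec : dpN v i j =
              1 + min (min (dpN v (i-1) j) (dpN v (i-1) (j-1))) (dpN v i (j-1)) := by
            rw [dpN]
            simp only [hv, if_true]
            rw [if_pos hp]
          have hB : k ≤ dpN v (i-1) (j-1) := by omega
          obtain ⟨i', hi', j', hj', he⟩ := IH (i-1) (by omega) (j-1) hB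
          exact ⟨i', by omega, j', by omega, he⟩
        · have h1 : dpN v i j = 1 := by
            rw [dpN]
            simp only [hv, if_true]
            rw [if_neg hp]
          omega
      · have h0 : dpN v i j = 0 := by
          rw [dpN, if_neg hv]
        omega

-- ---- the one dp-update step of A's inner loop, and what it does ----

lemma pvOne_true_iff (arr : List (List Int)) (mid : Int) (i j : Nat) :
    pvOne arr mid i j = true ↔ mid ≤ pvGet2 arr i j := by
  simp [pvOne, pvGet2]

def dp2Of (arr : List (List Int)) (mid : Int) (dp : List (List Int)) (i j : Nat) :
    List (List Int) :=
  let dp1 := pvSet2 dp i j 1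
  if 0 < i ∧ 0 < j then
    pvSet2 dp1 i j (pvGet2 dp1 i j +
      min (min (pvGet2 dp1 (i-1) j) (pvGet2 dp1 (i-1) (j-1))) (pvGet2 dp1 i (j-1)))
  else dp1

lemma loopJA_cons_eq (arr : List (List Int)) (mid : Int) (i : Nat) (dp : List (List Int))
    (j : Nat) (js : List Nat) :
    loopJA arr mid i dp (j :: js) =
      if mid ≤ pvGet2 arr i j then
        (if pvGet2 (dp2Of arr mid dp i j) i j = mid then none
         else loopJA arr mid i (dp2Of arr mid dp i j) js)
      else loopJA arr mid i dp js := by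
  simp only [loopJA, dp2Of]

lemma stepA (arr : List (List Int)) (mid : Int) (dp : List (List Int)) (i j : Nat)
    (hi : i < arr.length) (hj : j < (arr.headD []).length)
    (hsh : ShapeD dp arr.length (arr.headD []).length)
    (henc : EncD arr mid dp i j) (hone : pvOne arr mid i j = true) :
    pvGet2 (dp2Of arr mid dp i j) i j = ((dpN (pvOne arr mid) i j : Nat) : Int)
      ∧ ShapeD (dp2Of arr mid dp i j) arr.length (arr.headD []).length
      ∧ EncD arr mid (dp2Of arr mid dp i j) i (j+1) := by
  have hilen : i < dp.length := by have := hsh.1; omega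
  have hrowlen : j < (dp.getD i []).length := by rw [shape_row hsh hi]; exact hj
  have hsh1 : ShapeD (pvSet2 dp i j 1) arr.length (arr.headD []).length :=
    shape_set2 hsh i j 1
  have hself1 : pvGet2 (pvSet2 dp i j 1) i j = 1 := get2_set2_self 1 hilen hrowlen
  by_cases hp : 0 < i ∧ 0 < j
  · obtain ⟨hi0, hj0⟩ := hp
    have hg1 : pvGet2 (pvSet2 dp i j 1) (i-1) j = ((dpN (pvOne arr mid) (i-1) j : Nat) : Int) := by
      rw [get2_set2_ne 1 (Or.inl (by omega)), henc (i-1) j (by omega) hj,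
        if_pos (Or.inl (by omega))]
    have hg2 : pvGet2 (pvSet2 dp i j 1) (i-1) (j-1)
        = ((dpN (pvOne arr mid) (i-1) (j-1) : Nat) : Int) := by
      rw [get2_set2_ne 1 (Or.inl (by omega)), henc (i-1) (j-1) (by omega) (by omega),
        if_pos (Or.inl (by omega))]
    have hg3 : pvGet2 (pvSet2 dp i j 1) i (j-1)
        = ((dpN (pvOne arr mid) i (j-1) : Nat) : Int) := by
      rw [get2_set2_ne 1 (Or.inr (by omega)), henc i (j-1) hi (by omega),
        if_pos (Or.inr ⟨rfl, by omega⟩)]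
    have hdp2 : dp2Of arr mid dp i j = pvSet2 (pvSet2 dp i j 1) i j
        (((dpN (pvOne arr mid) i j : Nat) : Int)) := by
      rw [dp2Of]
      rw [if_pos ⟨hi0, hj0⟩, hself1, hg1, hg2, hg3]
      congr 1
      conv_rhs => rw [dpN]
      simp only [hone, if_true]
      rw [if_pos ⟨hi0, hj0⟩]
      push_cast
      ring
    have hsh2 : ShapeD (dp2Of arr mid dp i j) arr.length (arr.headD []).length := by
      rw [hdp2]; exact shape_set2 hsh1 i j _
    refine ⟨?_, hsh2, ?_⟩
    · rw [hdp2]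
      exact get2_set2_self _ (by have := hsh1.1; omega)
        (by rw [shape_row hsh1 hi]; exact hj)
    · intro i' j' hi' hj'
      by_cases hij : i' = i ∧ j' = j
      · obtain ⟨rfl, rfl⟩ := hij
        rw [hdp2, get2_set2_self _ (by have := hsh1.1; omega)
          (by rw [shape_row hsh1 hi]; exact hj), if_pos (Or.inr ⟨rfl, by omega⟩)]
      · have hne : i' ≠ i ∨ j' ≠ j := by
          by_cases h1 : i' = i
          · exact Or.inr (fun h2 => hij ⟨h1, h2⟩)
          · exact Or.inl h1
        rw [hdp2, get2_set2_ne _ hne, get2_set2_ne 1 hne, henc i' j' hi' hj']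
        have hiff : (i' < i ∨ (i' = i ∧ j' < j)) ↔ (i' < i ∨ (i' = i ∧ j' < j + 1)) := by
          rcases hne with h | h <;> omega
        simp only [hiff]
  · have hdp2 : dp2Of arr mid dp i j = pvSet2 dp i j 1 := by
      rw [dp2Of, if_neg hp]
    have hval : pvGet2 (dp2Of arr mid dp i j) i j = ((dpN (pvOne arr mid) i j : Nat) : Int) := by
      rw [hdp2, hself1, dpN]
      simp only [hone, if_true]
      rw [if_neg hp]
      simp
    refine ⟨hval, by rw [hdp2]; exact hsh1, ?_⟩
    intro i' j' hi' hj'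
    by_cases hij : i' = i ∧ j' = j
    · obtain ⟨rfl, rfl⟩ := hij
      rw [hval, if_pos (Or.inr ⟨rfl, by omega⟩)]
    · have hne : i' ≠ i ∨ j' ≠ j := by
        by_cases h1 : i' = i
        · exact Or.inr (fun h2 => hij ⟨h1, h2⟩)
        · exact Or.inl h1
      rw [hdp2, get2_set2_ne 1 hne, henc i' j' hi' hj']
      have hiff : (i' < i ∨ (i' = i ∧ j' < j)) ↔ (i' < i ∨ (i' = i ∧ j' < j + 1)) := by
        rcases hne with h | h <;> omega
      simp only [hiff]

-- ---- A's loops compute dpN and fire exactly on a TrigD cell ----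

lemma loopJA_run (arr : List (List Int)) (mid : Int) (i : Nat) (hi : i < arr.length) :
    ∀ (cnt j : Nat) (dp : List (List Int)), j + cnt = (arr.headD []).length →
      ShapeD dp arr.length (arr.headD []).length → EncD arr mid dp i j →
      ((∃ j', j ≤ j' ∧ j' < (arr.headD []).length ∧ TrigD arr mid i j') →
          loopJA arr mid i dp (List.range' j cnt) = none)
      ∧ ((∀ j', j ≤ j' → j' < (arr.headD []).length → ¬ TrigD arr mid i j') →
          ∃ dp', loopJA arr mid i dp (List.range' j cnt) = some dp'
            ∧ ShapeD dp' arr.length (arr.headD []).length ∧ EncD arr mid dp' (i + 1) 0) := by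
  intro cnt
  induction cnt with
  | zero =>
    intro j dp hjm hsh henc
    constructor
    · rintro ⟨j', hjj', hj'm, _⟩; omega
    · intro _
      refine ⟨dp, by simp [loopJA], hsh, ?_⟩
      intro i' j' hi' hj'
      rw [henc i' j' hi' hj']
      have hiff : (i' < i ∨ (i' = i ∧ j' < j)) ↔ (i' < i + 1 ∨ (i' = i + 1 ∧ j' < 0)) := by
        omega
      simp only [hiff]
  | succ cnt IH =>
    intro j dp hjm hsh henc
    have hjM : j < (arr.headD []).length := by omega
    rw [List.range'_succ]
    rw [loopJA_cons_eq]
    by_cases hone : mid ≤ pvGet2 arr i j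
    · have honeb : pvOne arr mid i j = true := (pvOne_true_iff arr mid i j).mpr hone
      obtain ⟨hval, hsh2, henc2⟩ := stepA arr mid dp i j hi hjM hsh henc honeb
      rw [if_pos hone]
      by_cases hm : pvGet2 (dp2Of arr mid dp i j) i j = mid
      · rw [if_pos hm]
        constructor
        · intro _; rfl
        · intro hno
          exact absurd ⟨honeb, by rw [← hval]; exact hm⟩ (hno j (le_refl j) hjM)
      · rw [if_neg hm]
        have IH' := IH (j+1) (dp2Of arr mid dp i j) (by omega) hsh2 henc2
        constructor
        · rintro ⟨j', hjj', hj'M, htr⟩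
          by_cases hjej : j' = j
          · subst hjej
            exact absurd (by rw [hval]; exact htr.2) hm
          · exact IH'.1 ⟨j', by omega, hj'M, htr⟩
        · intro hno
          exact IH'.2 (fun j' h1 h2 => hno j' (by omega) h2)
    · have honeb : ¬ pvOne arr mid i j = true := fun h =>
        hone ((pvOne_true_iff arr mid i j).mp h)
      rw [if_neg hone]
      have henc' : EncD arr mid dp i (j+1) := by
        intro i' j' hi' hj'
        by_cases hij : i' = i ∧ j' = j
        · obtain ⟨rfl, rfl⟩ := hij
          rw [henc i' j' hi' hj', if_neg (by omega), if_pos (Or.inr ⟨rfl, by omega⟩)]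
          rw [show dpN (pvOne arr mid) i' j' = 0 from by rw [dpN, if_neg honeb]]
          simp
        · have hne : i' ≠ i ∨ j' ≠ j := by
            by_cases h1 : i' = i
            · exact Or.inr (fun h2 => hij ⟨h1, h2⟩)
            · exact Or.inl h1
          rw [henc i' j' hi' hj']
          have hiff : (i' < i ∨ (i' = i ∧ j' < j)) ↔ (i' < i ∨ (i' = i ∧ j' < j + 1)) := by
            rcases hne with h | h <;> omega
          simp only [hiff]
      have IH' := IH (j+1) dp (by omega) hsh henc'
      constructor
      · rintro ⟨j', hjj', hj'M, htr⟩
        by_cases hjej : j' = j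
        · subst hjej
          exact absurd htr.1 honeb
        · exact IH'.1 ⟨j', by omega, hj'M, htr⟩
      · intro hno
        exact IH'.2 (fun j' h1 h2 => hno j' (by omega) h2)

lemma loopIA_run (arr : List (List Int)) (mid : Int) :
    ∀ (cnt i : Nat) (dp : List (List Int)), i + cnt = arr.length →
      ShapeD dp arr.length (arr.headD []).length → EncD arr mid dp i 0 →
      ((∃ i', i ≤ i' ∧ i' < arr.length ∧ ∃ j', j' < (arr.headD []).length ∧ TrigD arr mid i' j') →
          loopIA arr mid (arr.headD []).length dp (List.range' i cnt) = none)
      ∧ ((∀ i' j', i ≤ i' → i' < arr.length → j' < (arr.headD []).length → ¬ TrigD arr mid i' j') →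
          ∃ dp', loopIA arr mid (arr.headD []).length dp (List.range' i cnt) = some dp') := by
  intro cnt
  induction cnt with
  | zero =>
    intro i dp him hsh henc
    constructor
    · rintro ⟨i', h1, h2, _⟩; omega
    · intro _
      exact ⟨dp, by simp [loopIA]⟩
  | succ cnt IH =>
    intro i dp him hsh henc
    have hiN : i < arr.length := by omega
    have hJ := loopJA_run arr mid i hiN ((arr.headD []).length) 0 dp (by omega) hsh henc
    rw [List.range'_succ]
    simp only [loopIA, List.range_eq_range']
    by_cases hrow : ∃ j', j' < (arr.headD []).length ∧ TrigD arr mid i j'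
    · obtain ⟨j', hj', htr⟩ := hrow
      rw [hJ.1 ⟨j', by omega, hj', htr⟩]
      constructor
      · intro _; rfl
      · intro hno
        exact absurd htr (hno i j' (le_refl i) hiN hj')
    · obtain ⟨dp', hrun, hsh', henc'⟩ :=
        hJ.2 (fun j' _ h2 ht => hrow ⟨j', h2, ht⟩)
      rw [hrun]
      have IH' := IH (i+1) dp' (by omega) hsh' henc'
      constructor
      · rintro ⟨i', h1, h2, j', h3, htr⟩
        by_cases hie : i' = i
        · subst hie
          exact absurd ⟨j', h3, htr⟩ hrow
        · exact IH'.1 ⟨i', by omega, h2, j', h3, htr⟩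
      · intro hno
        exact IH'.2 (fun i' j' a b c => hno i' j' (by omega) b c)

lemma A_true_iff (arr : List (List Int)) (mid : Int) :
    maxValcheck arr mid = true ↔
      ∃ i, i < arr.length ∧ ∃ j, j < (arr.headD []).length ∧ TrigD arr mid i j := by
  have hsh0 : ShapeD (List.replicate arr.length
      (List.replicate (arr.headD []).length (0:Int))) arr.length (arr.headD []).length := by
    constructor
    · simp
    · intro r hr
      rw [List.eq_of_mem_replicate hr]
      simp
  have henc0 : EncD arr mid (List.replicate arr.length
      (List.replicate (arr.headD []).length (0:Int))) 0 0 := by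
    intro i' j' hi' hj'
    rw [if_neg (by omega)]
    simp [pvGet2, List.getD, List.getElem?_replicate]
    split_ifs <;> simp
  have hrun := loopIA_run arr mid arr.length 0
    (List.replicate arr.length (List.replicate (arr.headD []).length (0:Int)))
    (by omega) hsh0 henc0
  simp only [maxValcheck, List.range_eq_range']
  by_cases hex : ∃ i, i < arr.length ∧ ∃ j, j < (arr.headD []).length ∧ TrigD arr mid i j
  · obtain ⟨i, h1, j, h2, h3⟩ := hex
    rw [hrun.1 ⟨i, by omega, h1, j, h2, h3⟩]
    exact iff_of_true rfl ⟨i, h1, j, h2, h3⟩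
  · obtain ⟨dp', hdp'⟩ := hrun.2 (fun i' j' _ b c ht => hex ⟨i', b, j', c, ht⟩)
    rw [hdp']
    exact iff_of_false (by simp) hex

-- ---- the common combinatorial content: a trigger cell iff a mid×mid all-≥mid window ----

lemma exists_trig_iff (arr : List (List Int)) (mid : Int) :
    (∃ i, i < arr.length ∧ ∃ j, j < (arr.headD []).length ∧ TrigD arr mid i j) ↔
      (1 ≤ mid ∧ mid ≤ (arr.length : Int) ∧ mid ≤ ((arr.headD []).length : Int) ∧
        ∃ i, i + mid.toNat ≤ arr.length ∧ ∃ j, j + mid.toNat ≤ (arr.headD []).length ∧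
          ∀ a < mid.toNat, ∀ b < mid.toNat, pvOne arr mid (i + a) (j + b) = true) := by
  constructor
  · rintro ⟨i, hi, j, hj, htr⟩
    have hone := htr.1
    have heq := htr.2
    have hpos : 1 ≤ dpN (pvOne arr mid) i j := dpN_pos hone
    have hmid1 : 1 ≤ mid := by omega
    have hk : mid.toNat = dpN (pvOne arr mid) i j := by omega
    obtain ⟨hdi, hdj, hsq⟩ :=
      (dpN_le_iff (pvOne arr mid) (i+j) i j (dpN (pvOne arr mid) i j) (le_refl _)).mp
        (le_refl _)
    refine ⟨hmid1, by omega, by omega,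
      i + 1 - dpN (pvOne arr mid) i j, by omega,
      j + 1 - dpN (pvOne arr mid) i j, by omega, ?_⟩
    intro a ha b hb
    rw [hk] at ha hb
    have he1 : i + 1 - dpN (pvOne arr mid) i j + a
        = i - (dpN (pvOne arr mid) i j - 1 - a) := by omega
    have he2 : j + 1 - dpN (pvOne arr mid) i j + b
        = j - (dpN (pvOne arr mid) i j - 1 - b) := by omega
    rw [he1, he2]
    exact hsq _ (by omega) _ (by omega)
  · rintro ⟨hmid1, hmn, hmm, i0, hin, j0, hjm, hsq⟩
    have hk1 : 1 ≤ mid.toNat := by omega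
    have hIle : mid.toNat ≤ dpN (pvOne arr mid) (i0 + mid.toNat - 1) (j0 + mid.toNat - 1) := by
      apply (dpN_le_iff (pvOne arr mid) ((i0 + mid.toNat - 1) + (j0 + mid.toNat - 1))
        (i0 + mid.toNat - 1) (j0 + mid.toNat - 1) mid.toNat (le_refl _)).mpr
      refine ⟨by omega, by omega, ?_⟩
      intro a ha b hb
      have he1 : i0 + mid.toNat - 1 - a = i0 + (mid.toNat - 1 - a) := by omega
      have he2 : j0 + mid.toNat - 1 - b = j0 + (mid.toNat - 1 - b) := by omega
      rw [he1, he2]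
      exact hsq _ (by omega) _ (by omega)
    obtain ⟨i', hi', j', hj', he⟩ := dpN_descent (pvOne arr mid) mid.toNat hk1 _ _ hIle
    refine ⟨i', by omega, j', by omega, one_of_dpN_pos (by omega), ?_⟩
    rw [he]
    omega

lemma B_true_iff (arr : List (List Int)) (mid : Int) :
    maxValcheck_alt arr mid = true ↔
      (1 ≤ mid ∧ mid ≤ (arr.length : Int) ∧ mid ≤ ((arr.headD []).length : Int) ∧
        ∃ i, i + mid.toNat ≤ arr.length ∧ ∃ j, j + mid.toNat ≤ (arr.headD []).length ∧
          ∀ a < mid.toNat, ∀ b < mid.toNat, pvOne arr mid (i + a) (j + b) = true) := by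
  simp only [maxValcheck_alt]
  by_cases hg : mid < 1 ∨ (arr.length : Int) < mid ∨ ((arr.headD []).length : Int) < mid
  · rw [if_pos hg]
    constructor
    · intro h; exact absurd h (by simp)
    · rintro ⟨h1, h2, h3, _⟩
      rcases hg with h | h | h <;> omega
  · rw [if_neg hg]
    push_neg at hg
    obtain ⟨hm1, hmn, hmm⟩ := hg
    have hk1 : 1 ≤ mid.toNat := by omega
    have hkn : mid.toNat ≤ arr.length := by omega
    have hkm : mid.toNat ≤ (arr.headD []).length := by omega
    simp only [List.any_eq_true, List.all_eq_true, List.mem_range, decide_eq_true_eq]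
    constructor
    · rintro ⟨i, hi, j, hj, hw⟩
      exact ⟨by omega, hmn, hmm, i, by omega, j, by omega, fun a ha b hb => by
        simpa [pvOne] using hw a ha b hb⟩
    · rintro ⟨_, _, _, i, hi, j, hj, hw⟩
      exact ⟨i, by omega, j, by omega, fun a ha b hb => by
        simpa [pvOne] using hw a ha b hb⟩

-- ===== VERDICT (by name: the statement is the Claim_ definition above) =====
theorem maxValcheck_spec : Claim_equal_maxValcheck := by
  intro arr mid _ _
  unfold Spec_maxValcheck
  have h : (maxValcheck arr mid = true) ↔ (maxValcheck_alt arr mid = true) := by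
    rw [A_true_iff, B_true_iff, exists_trig_iff]
  cases hA : maxValcheck arr mid <;> cases hB : maxValcheck_alt arr mid <;> simp_all
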